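-- pv_equiv track=rewrite | github.com/eternalseptember/Random_Python | hacker_rank/heaps/cookies.py | cookies_arrange
-- ===== SOURCE A (Python) =====
-- def cookies_arrange(cookies, min_sweetness):
-- 	cookies_list = cookies[:]
-- 	cookies_list.sort()
--
-- 	steps = 0
-- 	while (cookies_list[0] < min_sweetness):
-- 		cookie1 = cookies_list.pop(0)
-- 		cookie2 = cookies_list.pop(0)
-- 		new_cookie = cookie_formula(cookie1, cookie2)
-- 		cookies_list.append(new_cookie)
-- 		cookies_list.sort()
-- 		steps += 1
--
-- 		if len(cookies_list) == 1:
-- 			break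
--
-- 	if cookies_list[0] >= min_sweetness:
-- 		return steps
-- 	else:
-- 		return -1
--
-- def cookie_formula(cookie_1, cookie_2):
-- 	return (1 * cookie_1 + 2 * cookie_2)
-- ===== SOURCE B (Python) =====
-- def _make(v, l, m):
--     # rebuild a node: larger-rank child goes left, rank = 1 + rank of the right child
--     lr = l[1] if l is not None else 0
--     mr = m[1] if m is not None else 0
--     if lr >= mr:
--         return (v, mr + 1, l, m)
--     return (v, lr + 1, m, l)
--
-- def _meld(a, b):
--     # Leftist-heap merge; a heap is None (empty) or a tuple (value, rank, left, right).
--     if a is None: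
--         return b
--     if b is None:
--         return a
--     if b[0] < a[0]:
--         a, b = b, a
--     return _make(a[0], a[2], _meld(a[3], b))
--
-- def cookies_arrange(cookies, min_sweetness):
--     heap = None
--     for c in cookies:
--         heap = _meld(heap, (c, 1, None, None))
--     steps = 0
--     while heap is not None and heap[0] < min_sweetness:
--         if heap[2] is None and heap[3] is None:
--             return -1
--         c1 = heap[0]
--         rest = _meld(heap[2], heap[3])
--         c2 = rest[0]
--         heap = _meld(_meld(rest[2], rest[3]), (c1 + 2 * c2, 1, None, None))
--         steps += 1
--     return steps
-- ===== Notes on version B (the rewrite author's own statement) =====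
-- stated objective: faster
-- what changed: B replaces A's sort-per-iteration list with a hand-rolled leftist min-heap (meld-based tuple trees): build the heap once, then each step pops the two minima and melds the combined cookie back in, never sorting.
import Mathlib
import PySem

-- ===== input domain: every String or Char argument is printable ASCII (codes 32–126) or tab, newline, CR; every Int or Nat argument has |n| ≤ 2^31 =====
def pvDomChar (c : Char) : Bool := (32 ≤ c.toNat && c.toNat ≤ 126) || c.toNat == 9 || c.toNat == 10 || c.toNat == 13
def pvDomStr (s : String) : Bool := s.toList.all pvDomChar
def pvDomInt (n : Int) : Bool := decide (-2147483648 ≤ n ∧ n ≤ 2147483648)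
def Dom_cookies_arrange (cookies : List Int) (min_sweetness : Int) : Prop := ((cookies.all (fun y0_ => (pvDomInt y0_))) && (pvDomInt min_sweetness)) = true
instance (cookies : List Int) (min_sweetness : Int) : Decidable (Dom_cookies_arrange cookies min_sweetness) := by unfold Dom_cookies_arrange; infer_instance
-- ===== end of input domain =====

-- B replaces A's sort-per-iteration list with a leftist min-heap (meld-based trees):
-- build once, pop two minima per step, meld the combined cookie back in — no sorting.

-- ===== PORT A =====
def cookieFormula (c1 c2 : Int) : Int := 1 * c1 + 2 * c2

-- A's while loop; the list shrinks by one element per iteration.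
def cookiesLoopA (min_s : Int) : List Int → Int → Int
  | [], _ => 0          -- Python: IndexError on cookies_list[0]; outside Pre_
  | a :: rest, steps =>
    if a < min_s then
      match rest with
      | [] => 0         -- Python: IndexError on the second pop(0); outside Pre_
      | b :: rest2 =>
        let l' := PySem.List.sorted (rest2 ++ [cookieFormula a b]) (fun x => x) false
        if l'.length = 1 then
          -- break, then the final check after the loop
          (match l' with
           | x :: _ => if x ≥ min_s then steps + 1 else -1
           | [] => 0)
        else cookiesLoopA min_s l' (steps + 1)
    else
      -- loop exits; final check after the loop
      if a ≥ min_s then steps else -1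
termination_by l _ => l.length
decreasing_by simp [PySem.List.length_sorted]

def cookies_arrange (cookies : List Int) (min_sweetness : Int) : Int :=
  cookiesLoopA min_sweetness (PySem.List.sorted cookies (fun x => x) false) 0

-- ===== PORT B =====
-- Source B's heaps: None → leaf, tuple (value, rank, left, right) → node.
inductive LHeap
  | leaf
  | node : Int → Int → LHeap → LHeap → LHeap
deriving DecidableEq, Repr

-- Python's `x[1] if x is not None else 0`
def lhRank : LHeap → Int
  | .leaf => 0
  | .node _ r _ _ => r

def lhSize : LHeap → Nat
  | .leaf => 0
  | .node _ _ l r => 1 + lhSize l + lhSize r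

-- Source B's _make: rebuild a node, larger-rank child on the left.
def mkNode (v : Int) (l m : LHeap) : LHeap :=
  if lhRank l ≥ lhRank m then .node v (lhRank m + 1) l m
  else .node v (lhRank l + 1) m l

theorem lhSize_mkNode (v : Int) (l m : LHeap) :
    lhSize (mkNode v l m) = 1 + lhSize l + lhSize m := by
  unfold mkNode; split <;> simp [lhSize]
  omega

theorem meld_dec1 (a : LHeap) (vb rb : Int) (lb rtb : LHeap) :
    lhSize a + lhSize rtb < lhSize a + lhSize (.node vb rb lb rtb) := by
  simp [lhSize]

theorem meld_dec2 (va ra : Int) (la rta : LHeap) (b : LHeap) :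
    lhSize rta + lhSize b < lhSize (.node va ra la rta) + lhSize b := by
  simp [lhSize]

-- Source B's _meld, step for step (swap so the smaller root wins, meld into the right child).
def meld : LHeap → LHeap → LHeap
  | .leaf, b => b
  | .node va ra la rta, .leaf => .node va ra la rta
  | .node va ra la rta, .node vb rb lb rtb =>
    if vb < va then mkNode vb lb (meld (.node va ra la rta) rtb)
    else mkNode va la (meld rta (.node vb rb lb rtb))
termination_by a b => lhSize a + lhSize b
decreasing_by
  · exact meld_dec1 _ _ _ _ _
  · exact meld_dec2 _ _ _ _ _

theorem lhSize_meld (a b : LHeap) : lhSize (meld a b) = lhSize a + lhSize b := by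
  fun_induction meld a b <;> simp_all [lhSize, lhSize_mkNode] <;> try omega

-- Python's rest[0], rest[2], rest[3] accessors (leaf cases unreachable in the loop).
def lhVal : LHeap → Int
  | .leaf => 0
  | .node v _ _ _ => v
def lhLeft : LHeap → LHeap
  | .leaf => .leaf
  | .node _ _ l _ => l
def lhRight : LHeap → LHeap
  | .leaf => .leaf
  | .node _ _ _ rt => rt

theorem lhSize_eq_zero (t : LHeap) : lhSize t = 0 ↔ t = .leaf := by
  cases t <;> simp [lhSize]

theorem lhSize_children (t : LHeap) (ht : t ≠ .leaf) :
    lhSize (lhLeft t) + lhSize (lhRight t) + 1 = lhSize t := by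
  cases t with
  | leaf => exact absurd rfl ht
  | node v r l rt => simp [lhLeft, lhRight, lhSize]; omega

theorem loopB_dec (x v rk : Int) (l rt : LHeap) (hnb : ¬(l = .leaf ∧ rt = .leaf)) :
    lhSize (meld (meld (lhLeft (meld l rt)) (lhRight (meld l rt))) (.node x 1 .leaf .leaf))
      < lhSize (.node v rk l rt) := by
  have hrest : meld l rt ≠ .leaf := by
    intro hc
    have hsz := lhSize_meld l rt
    rw [hc] at hsz
    simp only [lhSize] at hsz
    exact hnb ⟨(lhSize_eq_zero l).mp (by omega), (lhSize_eq_zero rt).mp (by omega)⟩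
  have h2 := lhSize_children (meld l rt) hrest
  rw [lhSize_meld] at h2
  simp only [lhSize_meld, lhSize]
  omega

-- Source B's main while loop.
def cookiesLoopB (min_s : Int) : LHeap → Int → Int
  | .leaf, steps => steps
  | .node v _ l rt, steps =>
    if v < min_s then
      if l = .leaf ∧ rt = .leaf then -1
      else
        let rest := meld l rt
        cookiesLoopB min_s
          (meld (meld (lhLeft rest) (lhRight rest)) (.node (v + 2 * lhVal rest) 1 .leaf .leaf))
          (steps + 1)
    else steps
termination_by h _ => lhSize h
decreasing_by
  rename_i hnb
  exact loopB_dec _ _ _ _ _ hnb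

def cookies_arrange_alt (cookies : List Int) (min_sweetness : Int) : Int :=
  cookiesLoopB min_sweetness
    (cookies.foldl (fun h c => meld h (.node c 1 .leaf .leaf)) .leaf) 0

-- ===== PRECONDITION & SPEC =====
-- Pre_ excludes exactly the inputs where A raises IndexError: the empty list
-- (first subscript) and a one-element list below the threshold (second pop).
def Pre_cookies_arrange (cookies : List Int) (min_sweetness : Int) : Prop :=
  cookies ≠ [] ∧ (cookies.length = 1 → min_sweetness ≤ cookies.headI)
instance (cookies : List Int) (min_sweetness : Int) : Decidable (Pre_cookies_arrange cookies min_sweetness) := by unfold Pre_cookies_arrange; infer_instance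

def pvWitness_cookies_arrange : List Int × Int := ([1, 2, 3, 9], 9)

def Spec_cookies_arrange (cookies : List Int) (min_sweetness : Int) (out : Int) : Prop := out = cookies_arrange_alt cookies min_sweetness
instance (cookies : List Int) (min_sweetness : Int) (out : Int) : Decidable (Spec_cookies_arrange cookies min_sweetness out) := by unfold Spec_cookies_arrange; infer_instance

-- ===== CLAIM (what is proved, stated in full; the proofs are below) =====
def Claim_equal_cookies_arrange : Prop := ∀ (cookies : List Int) (min_sweetness : Int), Dom_cookies_arrange cookies min_sweetness → Pre_cookies_arrange cookies min_sweetness → Spec_cookies_arrange cookies min_sweetness (cookies_arrange cookies min_sweetness)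

-- ===== LEMMAS AND PROOFS =====

-- elements of a heap
def lhList : LHeap → List Int
  | .leaf => []
  | .node v _ l r => v :: (lhList l ++ lhList r)

-- heap order: the root of every subtree bounds that subtree
def lhIsHeap : LHeap → Prop
  | .leaf => True
  | .node v _ l r =>
    (∀ x ∈ lhList l, v ≤ x) ∧ (∀ x ∈ lhList r, v ≤ x) ∧ lhIsHeap l ∧ lhIsHeap r

theorem coe_lhList_mkNode (v : Int) (l m : LHeap) :
    (↑(lhList (mkNode v l m)) : Multiset Int) = v ::ₘ (↑(lhList l) + ↑(lhList m)) := by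
  unfold mkNode; split <;>
    (simp only [lhList, ← Multiset.cons_coe, ← Multiset.coe_add, ← Multiset.singleton_add]; try abel)

theorem coe_lhList_meld (a b : LHeap) :
    (↑(lhList (meld a b)) : Multiset Int) = ↑(lhList a) + ↑(lhList b) := by
  fun_induction meld a b with
  | case1 => simp [lhList]
  | case2 => simp [lhList]
  | case3 va ra la rta vb rb lb rtb hlt ih =>
    rw [coe_lhList_mkNode, ih]
    simp only [lhList, ← Multiset.cons_coe, ← Multiset.coe_add, ← Multiset.singleton_add]; abel
  | case4 va ra la rta vb rb lb rtb hlt ih =>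
    rw [coe_lhList_mkNode, ih]
    simp only [lhList, ← Multiset.cons_coe, ← Multiset.coe_add, ← Multiset.singleton_add]; abel

theorem lhList_meld (a b : LHeap) : (lhList (meld a b)).Perm (lhList a ++ lhList b) := by
  rw [← Multiset.coe_eq_coe, ← Multiset.coe_add]; exact coe_lhList_meld a b

theorem mem_lhList_meld (x : Int) (a b : LHeap) :
    x ∈ lhList (meld a b) ↔ x ∈ lhList a ∨ x ∈ lhList b := by
  rw [(lhList_meld a b).mem_iff, List.mem_append]

theorem mem_lhList_node (x v r : Int) (l rt : LHeap) :
    x ∈ lhList (.node v r l rt) ↔ x = v ∨ x ∈ lhList l ∨ x ∈ lhList rt := by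
  simp [lhList]

theorem lhIsHeap_mkNode (v : Int) (l m : LHeap) (hl : lhIsHeap l) (hm : lhIsHeap m)
    (hbl : ∀ x ∈ lhList l, v ≤ x) (hbm : ∀ x ∈ lhList m, v ≤ x) :
    lhIsHeap (mkNode v l m) := by
  unfold mkNode; split
  · exact ⟨hbl, hbm, hl, hm⟩
  · exact ⟨hbm, hbl, hm, hl⟩

theorem lhIsHeap_meld (a b : LHeap) (ha : lhIsHeap a) (hb : lhIsHeap b) :
    lhIsHeap (meld a b) := by
  fun_induction meld a b with
  | case1 => exact hb
  | case2 => exact ha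
  | case3 va ra la rta vb rb lb rtb hlt ih =>
    obtain ⟨hbl, hbr, hhl, hhr⟩ := hb
    refine lhIsHeap_mkNode _ _ _ hhl (ih ha hhr) hbl ?_
    intro x hx
    rcases (mem_lhList_meld x _ _).mp hx with h | h
    · rcases (mem_lhList_node x _ _ _ _).mp h with h | h | h
      · omega
      · exact le_of_lt (lt_of_lt_of_le hlt (ha.1 x h))
      · exact le_of_lt (lt_of_lt_of_le hlt (ha.2.1 x h))
    · exact hbr x h
  | case4 va ra la rta vb rb lb rtb hlt ih =>
    obtain ⟨hal, har, hhl, hhr⟩ := ha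
    refine lhIsHeap_mkNode _ _ _ hhl (ih hhr hb) hal ?_
    intro x hx
    have hvab : va ≤ vb := le_of_not_gt hlt
    rcases (mem_lhList_meld x _ _).mp hx with h | h
    · exact har x h
    · rcases (mem_lhList_node x _ _ _ _).mp h with h | h | h
      · omega
      · exact le_trans hvab (hb.1 x h)
      · exact le_trans hvab (hb.2.1 x h)

theorem lhRoot_le (v r : Int) (l rt : LHeap) (hh : lhIsHeap (.node v r l rt)) :
    ∀ x ∈ lhList (.node v r l rt), v ≤ x := by
  intro x hx
  rcases (mem_lhList_node x _ _ _ _).mp hx with h | h | h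
  · omega
  · exact hh.1 x h
  · exact hh.2.1 x h

-- head of a sorted list = root of a heap over the same multiset
theorem root_eq_head (v r : Int) (l rt : LHeap) (hd : Int) (tl : List Int)
    (hh : lhIsHeap (.node v r l rt))
    (hp : (lhList (.node v r l rt)).Perm (hd :: tl))
    (hs : (hd :: tl).Pairwise (· ≤ ·)) : v = hd := by
  have hv_mem : v ∈ (hd :: tl) := hp.subset (by simp [lhList])
  have hhd_mem : hd ∈ lhList (.node v r l rt) := hp.symm.subset (by simp)
  have h1 : v ≤ hd := lhRoot_le v r l rt hh hd hhd_mem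
  have h2 : hd ≤ v := by
    rcases List.mem_cons.mp hv_mem with h | h
    · omega
    · exact (List.pairwise_cons.mp hs).1 v h
  omega

theorem lhList_eq_nil (t : LHeap) : lhList t = [] ↔ t = .leaf := by
  cases t <;> simp [lhList]

theorem lhList_singleton (t : LHeap) (x : Int) (hp : (lhList t).Perm [x]) :
    ∃ r, t = .node x r .leaf .leaf := by
  cases t with
  | leaf => simpa [lhList] using hp.length_eq
  | node v r l rt =>
    have hlen := hp.length_eq
    simp [lhList] at hlen
    have hl : l = .leaf := by
      rw [← lhList_eq_nil]; cases hll : lhList l <;> simp_all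
    have hrt : rt = .leaf := by
      rw [← lhList_eq_nil]; cases hll : lhList rt <;> simp_all
    subst hl; subst hrt
    have : v = x := by simpa [lhList] using hp
    exact ⟨r, by rw [this]⟩

theorem lhIsHeap_singleton (x rk : Int) : lhIsHeap (.node x rk .leaf .leaf) := by
  simp [lhIsHeap, lhList]

theorem loopA_cons (m a s : Int) (rest : List Int) :
    cookiesLoopA m (a :: rest) s =
      (if a < m then
        match rest with
        | [] => 0
        | b :: rest2 =>
          let l' := PySem.List.sorted (rest2 ++ [cookieFormula a b]) (fun x => x) false
          if l'.length = 1 then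
            (match l' with
             | x :: _ => if x ≥ m then s + 1 else -1
             | [] => 0)
          else cookiesLoopA m l' (s + 1)
      else if a ≥ m then s else -1) := by
  rw [cookiesLoopA.eq_def]

theorem loopB_node (m v rk steps : Int) (l rt : LHeap) :
    cookiesLoopB m (.node v rk l rt) steps =
      if v < m then
        if l = .leaf ∧ rt = .leaf then -1
        else
          cookiesLoopB m
            (meld (meld (lhLeft (meld l rt)) (lhRight (meld l rt)))
              (.node (v + 2 * lhVal (meld l rt)) 1 .leaf .leaf))
            (steps + 1)
      else steps := by
  rw [cookiesLoopB.eq_def]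

-- the bisimulation: A on its sorted list, B on any heap over the same multiset
theorem loop_eq (min_s : Int) (s : List Int) (h : LHeap) (steps : Int)
    (hs : s.Pairwise (· ≤ ·)) (hperm : (lhList h).Perm s) (hheap : lhIsHeap h)
    (hne : s ≠ []) (h1 : s.length = 1 → min_s ≤ s.headI) :
    cookiesLoopA min_s s steps = cookiesLoopB min_s h steps := by
  match s with
  | [] => exact absurd rfl hne
  | [a] =>
    obtain ⟨r, rfl⟩ := lhList_singleton h a hperm
    have ha : min_s ≤ a := h1 rfl
    rw [loopA_cons, loopB_node]
    simp [not_lt.mpr ha, ge_iff_le, ha]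
  | a :: b :: rest2 =>
    cases h with
    | leaf =>
      have := hperm.length_eq
      simp [lhList] at this
    | node v rk l rt =>
      have hva : v = a := root_eq_head v rk l rt a (b :: rest2) hheap hperm hs
      subst hva
      obtain ⟨hbl, hbr, hhl, hhr⟩ := hheap
      rw [loopA_cons, loopB_node]
      by_cases hcond : v < min_s
      · -- combine the two smallest
        have hpl : (lhList l ++ lhList rt).Perm (b :: rest2) := by
          have := hperm
          simp only [lhList] at this
          exact this.cons_inv
        have hnb : ¬ (l = .leaf ∧ rt = .leaf) := by
          rintro ⟨rfl, rfl⟩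
          simpa [lhList] using hpl.length_eq
        have hpr : (lhList (meld l rt)).Perm (b :: rest2) := (lhList_meld l rt).trans hpl
        have hhrest : lhIsHeap (meld l rt) := lhIsHeap_meld l rt hhl hhr
        cases hrest : meld l rt with
        | leaf => rw [hrest] at hpr; simpa [lhList] using hpr.length_eq
        | node v2 r2 l2 rt2 =>
          rw [hrest] at hpr hhrest
          have hv2 : v2 = b :=
            root_eq_head v2 r2 l2 rt2 b rest2 hhrest hpr (List.pairwise_cons.mp hs).2
          subst hv2
          obtain ⟨hb2l, hb2r, hh2l, hh2r⟩ := hhrest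
          have hpl2 : (lhList l2 ++ lhList rt2).Perm rest2 := by
            have := hpr
            simp only [lhList] at this
            exact this.cons_inv
          -- the new heap and its properties
          have hph' :
              (lhList (meld (meld l2 rt2) (.node (v + 2 * v2) 1 .leaf .leaf))).Perm
                (rest2 ++ [v + 2 * v2]) := by
            refine (lhList_meld _ _).trans ?_
            have : (lhList (meld l2 rt2)).Perm rest2 := (lhList_meld l2 rt2).trans hpl2
            simpa [lhList] using this.append_right [v + 2 * v2]
          have hheap' : lhIsHeap (meld (meld l2 rt2) (.node (v + 2 * v2) 1 .leaf .leaf)) :=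
            lhIsHeap_meld _ _ (lhIsHeap_meld l2 rt2 hh2l hh2r) (lhIsHeap_singleton _ _)
          have hform : cookieFormula v v2 = v + 2 * v2 := by simp [cookieFormula]
          have hlperm :
              (PySem.List.sorted (rest2 ++ [cookieFormula v v2]) (fun x => x) false).Perm
                (rest2 ++ [v + 2 * v2]) := by
            rw [hform]; exact PySem.List.sorted_perm _ _ _
          simp only [hcond, if_pos, if_neg hnb, lhVal, lhLeft, lhRight]
          by_cases hlen :
              (PySem.List.sorted (rest2 ++ [cookieFormula v v2]) (fun x => x) false).length = 1
          · -- A breaks: rest2 = []; B's next heap is a singleton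
            have hr2 : rest2 = [] := by
              rw [PySem.List.length_sorted] at hlen
              cases rest2 <;> simp_all
            subst hr2
            have hl' : PySem.List.sorted ([] ++ [cookieFormula v v2]) (fun x => x) false
                = [v + 2 * v2] := by
              rw [hform]
              exact PySem.List.sorted_eq_self_of_pairwise _ _ (by simp)
            obtain ⟨r', hsing⟩ :=
              lhList_singleton (meld (meld l2 rt2) (.node (v + 2 * v2) 1 .leaf .leaf))
                (v + 2 * v2) (by simpa using hph')
            rw [if_pos hlen, hl', hsing, loopB_node]
            by_cases hfin : v + 2 * v2 < min_s
            · simp [hfin, not_le.mpr hfin]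
            · simp [hfin, ge_iff_le, not_lt.mp hfin]
          · -- both loops continue
            rw [if_neg hlen]
            refine loop_eq min_s _ _ (steps + 1) ?_ ?_ hheap' ?_ ?_
            · simpa using
                PySem.List.sorted_pairwise (xs := rest2 ++ [cookieFormula v v2])
                  (key := fun y : Int => y)
            · exact hph'.trans hlperm.symm
            · intro hc
              rw [hc] at hlperm
              simpa using hlperm.length_eq
            · intro hc
              exact absurd hc hlen
      · simp [hcond, ge_iff_le, not_lt.mp hcond]
termination_by s.length
decreasing_by
  simp [PySem.List.length_sorted]

theorem heapify_aux (cs : List Int) :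
    ∀ h : LHeap, lhIsHeap h →
      lhIsHeap (cs.foldl (fun h c => meld h (.node c 1 .leaf .leaf)) h) ∧
      (lhList (cs.foldl (fun h c => meld h (.node c 1 .leaf .leaf)) h)).Perm (lhList h ++ cs) := by
  induction cs with
  | nil => intro h hh; exact ⟨hh, by simp⟩
  | cons c cs ih =>
    intro h hh
    obtain ⟨hh', hp'⟩ := ih (meld h (.node c 1 .leaf .leaf))
      (lhIsHeap_meld _ _ hh (lhIsHeap_singleton _ _))
    refine ⟨hh', ?_⟩
    simp only [List.foldl]
    refine hp'.trans ?_
    have h2 : (lhList (meld h (.node c 1 .leaf .leaf))).Perm (lhList h ++ [c]) :=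
      (lhList_meld _ _).trans (by simp [lhList])
    simpa using h2.append_right cs

theorem heapify_spec (cs : List Int) :
    lhIsHeap (cs.foldl (fun h c => meld h (.node c 1 .leaf .leaf)) .leaf) ∧
    (lhList (cs.foldl (fun h c => meld h (.node c 1 .leaf .leaf)) .leaf)).Perm cs := by
  simpa [lhList] using heapify_aux cs .leaf (by simp [lhIsHeap])

-- ===== VERDICT (by name: the statement is the Claim_ definition above) =====
theorem cookies_arrange_spec : Claim_equal_cookies_arrange := by
  intro cookies min_s _ hpre
  unfold Spec_cookies_arrange cookies_arrange cookies_arrange_alt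
  have hfold : lhIsHeap (cookies.foldl (fun h c => meld h (.node c 1 .leaf .leaf)) .leaf) ∧
      (lhList (cookies.foldl (fun h c => meld h (.node c 1 .leaf .leaf)) .leaf)).Perm cookies :=
    heapify_spec cookies
  refine loop_eq min_s _ _ 0 ?_ ?_ hfold.1 ?_ ?_
  · simpa using PySem.List.sorted_pairwise (xs := cookies) (key := fun y : Int => y)
  · exact hfold.2.trans (PySem.List.sorted_perm cookies (fun y : Int => y) false).symm
  · rw [Ne, PySem.List.sorted_eq_nil_iff]
    exact hpre.1
  · intro hlen
    rw [PySem.List.length_sorted] at hlen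
    obtain ⟨x, hx⟩ := List.length_eq_one_iff.mp hlen
    subst hx
    have hone : PySem.List.sorted [x] (fun y : Int => y) false = [x] :=
      PySem.List.sorted_eq_self_of_pairwise [x] (fun y => y) (by simp)
    rw [hone]
    simpa using hpre.2 (by simp)
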